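-- pv_equiv track=rewrite | github.com/HidenLee/BaekjoonHub | 프로그래머스/3/42627. 디스크 컨트롤러/디스크 컨트롤러.py | solution
-- ===== SOURCE A (Python) =====
-- def solution(jobs):
--     jobs.sort()
--     import heapq
--     time = 0
--     leftidx = 0
--     N = len(jobs)
--     answer = []
--     queue = []
--     while len(answer) != N:
--         while leftidx < N and jobs[leftidx][0] <= time:
--             heapq.heappush(queue,(jobs[leftidx][1],jobs[leftidx][0],leftidx))
--             leftidx += 1
--         if not queue:
--             time += 1
--             continue
--         duration, callTime, _ = heapq.heappop(queue)
--         time += duration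
--         answer.append(time-callTime)
--
--
--     return sum(answer) // N
-- ===== SOURCE B (Python) =====
-- def solution(jobs):
--     jobs.sort()
--     n = len(jobs)
--     time = 0
--     i = 0
--     available = []
--     total = 0
--     done = 0
--     while done < n:
--         # jump straight to the next arrival instead of stepping time += 1
--         if not available and i < n and jobs[i][0] > time:
--             time = jobs[i][0]
--         while i < n and jobs[i][0] <= time:
--             available.append((jobs[i][1], jobs[i][0], i))
--             i += 1
--         best = min(available)
--         available.remove(best)
--         time += best[0]
--         total += time - best[1]
--         done += 1
--     return total // n
-- ===== Notes on version B (the rewrite author's own statement) =====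
-- stated objective: alternative
-- what changed: B drops the heapq min-heap for a plain list scanned linearly for the minimum (duration, arrival, index) triple, jumps idle time directly to the next arrival instead of stepping time += 1, and keeps a running total and counter instead of building an answer list to sum at the end.
import Mathlib
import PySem

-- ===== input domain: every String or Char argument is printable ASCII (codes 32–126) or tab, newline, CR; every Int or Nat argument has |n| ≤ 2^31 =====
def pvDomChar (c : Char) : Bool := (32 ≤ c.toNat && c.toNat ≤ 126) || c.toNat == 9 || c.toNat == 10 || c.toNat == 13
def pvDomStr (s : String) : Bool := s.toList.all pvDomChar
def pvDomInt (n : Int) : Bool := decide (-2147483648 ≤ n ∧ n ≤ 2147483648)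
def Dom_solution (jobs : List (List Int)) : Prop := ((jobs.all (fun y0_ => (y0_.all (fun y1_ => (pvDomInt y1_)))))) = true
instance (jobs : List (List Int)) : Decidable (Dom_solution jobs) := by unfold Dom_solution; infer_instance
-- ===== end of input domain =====

-- B replaces A's heap by a plain list with a linear min scan and jumps idle time straight to the
-- next arrival instead of stepping by 1 (objective: alternative).  Both A and B sort `jobs` in
-- place (same side effect); the equivalence proved here is about the return value.

-- ===== PORT A =====
-- Python tuple comparison (duration, callTime, idx): lexicographic on Int triples.
def pvLex3Lt (a b : Int × Int × Int) : Bool :=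
  decide (a.1 < b.1) || (decide (a.1 = b.1) &&
    (decide (a.2.1 < b.2.1) || (decide (a.2.1 = b.2.1) && decide (a.2.2 < b.2.2))))

-- heapq modeled as an ordered list: heappush = ordered insert, heappop = take the head.
-- Exact for the sequence of popped elements (the heap order itself is not observed).
def pvHeapPush (q : List (Int × Int × Int)) (x : Int × Int × Int) : List (Int × Int × Int) :=
  match q with
  | [] => [x]
  | y :: t => if pvLex3Lt x y then x :: y :: t else y :: pvHeapPush t x

-- the outer `while len(answer) != N` with the inner push-`while`, the idle `time += 1; continue`
-- and the pop merged into one recursion (one push per call; `else => 0` arms are totality guards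
-- for states unreachable from the initial state, where Python would loop forever / raise).
def pvLoopA (sj : List (List Int)) (N : Nat) (time : Int) (li : Nat)
    (queue : List (Int × Int × Int)) (answer : List Int) : Int :=
  if _hf : N ≤ answer.length then PySem.Int.floordiv answer.sum (N : Int)
  else if h : li < N ∧ (sj.getD li []).getD 0 0 ≤ time then
    pvLoopA sj N time (li + 1)
      (pvHeapPush queue ((sj.getD li []).getD 1 0, (sj.getD li []).getD 0 0, (li : Int))) answer
  else
    match queue with
    | [] => if li < N then pvLoopA sj N (time + 1) li [] answer else 0
    | (d, c, _) :: rest => pvLoopA sj N (time + d) li rest (answer ++ [time + d - c])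
termination_by (N - answer.length, N - li, ((sj.getD li []).getD 0 0 - time).toNat)
decreasing_by
  all_goals simp_all
  all_goals first
    | (apply Prod.Lex.left; omega)
    | (apply Prod.Lex.right; first | (apply Prod.Lex.left; omega) | (apply Prod.Lex.right; omega))

def solution (jobs : List (List Int)) : Int :=
  let sj := PySem.List.sorted jobs (fun x => x) false   -- jobs.sort(): stable, lexicographic
  pvLoopA sj jobs.length 0 0 [] []

-- ===== PORT B =====
-- min(available): first element that is lexicographically minimal (linear scan).
def pvMinScan (x : Int × Int × Int) (t : List (Int × Int × Int)) : Int × Int × Int :=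
  t.foldl (fun m y => if pvLex3Lt y m then y else m) x

-- B's `while done < n` with the jump, the fill-`while` and the min/remove step merged into one
-- recursion (the `[] => 0` arm is a totality guard for states unreachable from the start).
def pvLoopB (sj : List (List Int)) (n : Nat) (time : Int) (i : Nat)
    (avail : List (Int × Int × Int)) (total : Int) (done : Nat) : Int :=
  if _hf : n ≤ done then PySem.Int.floordiv total (n : Int)
  else if h : avail = [] ∧ i < n ∧ time < (sj.getD i []).getD 0 0 then
    pvLoopB sj n ((sj.getD i []).getD 0 0) i avail total done
  else if _h2 : i < n ∧ (sj.getD i []).getD 0 0 ≤ time then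
    pvLoopB sj n time (i + 1)
      (avail ++ [((sj.getD i []).getD 1 0, (sj.getD i []).getD 0 0, (i : Int))]) total done
  else
    match avail with
    | [] => 0
    | x :: t =>
      let best := pvMinScan x t
      pvLoopB sj n (time + best.1) i ((PySem.List.remove? (x :: t) best).getD [])
        (total + (time + best.1 - best.2.1)) (done + 1)
termination_by (n - done, n - i, ((sj.getD i []).getD 0 0 - time).toNat)
decreasing_by
  all_goals simp_all
  all_goals first
    | (apply Prod.Lex.left; omega)
    | (apply Prod.Lex.right; first | (apply Prod.Lex.left; omega) | (apply Prod.Lex.right; omega))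

def solution_alt (jobs : List (List Int)) : Int :=
  let sj := PySem.List.sorted jobs (fun x => x) false   -- jobs.sort()
  pvLoopB sj jobs.length 0 0 [] 0 0

-- ===== PRECONDITION & SPEC =====
-- Pre_ excludes exactly the inputs where Python A raises: the empty list (ZeroDivisionError in
-- sum(answer) // N) and any job row with fewer than 2 entries (IndexError on jobs[i][1]).
def Pre_solution (jobs : List (List Int)) : Prop :=
  jobs ≠ [] ∧ ∀ r ∈ jobs, 2 ≤ r.length
instance (jobs : List (List Int)) : Decidable (Pre_solution jobs) := by
  unfold Pre_solution; infer_instance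

def pvWitness_solution : List (List Int) := [[0, 3], [1, 9], [2, 6]]

def Spec_solution (jobs : List (List Int)) (out : Int) : Prop := out = solution_alt jobs
instance (jobs : List (List Int)) (out : Int) : Decidable (Spec_solution jobs out) := by
  unfold Spec_solution; infer_instance

-- ===== CLAIM (what is proved, stated in full; the proofs are below) =====
def Claim_equal_solution : Prop :=
  ∀ (jobs : List (List Int)), Dom_solution jobs → Pre_solution jobs →
    Spec_solution jobs (solution jobs)

-- ===== LEMMAS AND PROOFS =====

lemma pvLex3_total (a b : Int × Int × Int) :
    pvLex3Lt a b = true ∨ a = b ∨ pvLex3Lt b a = true := by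
  obtain ⟨a1, a2, a3⟩ := a; obtain ⟨b1, b2, b3⟩ := b
  simp [pvLex3Lt, Prod.ext_iff]; omega

lemma pvLex3_trans {a b c : Int × Int × Int}
    (h1 : pvLex3Lt a b = true) (h2 : pvLex3Lt b c = true) : pvLex3Lt a c = true := by
  obtain ⟨a1, a2, a3⟩ := a; obtain ⟨b1, b2, b3⟩ := b; obtain ⟨c1, c2, c3⟩ := c
  simp [pvLex3Lt] at *; omega

lemma pvLex3_irrefl (a : Int × Int × Int) : pvLex3Lt a a = false := by
  obtain ⟨a1, a2, a3⟩ := a; simp [pvLex3Lt]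

lemma pvHeapPush_perm (q : List (Int × Int × Int)) (x : Int × Int × Int) :
    (pvHeapPush q x).Perm (q ++ [x]) := by
  induction q with
  | nil => simp [pvHeapPush]
  | cons y t ih =>
    simp only [pvHeapPush]
    split
    · exact List.Perm.symm (List.perm_append_comm.trans (by simp))
    · exact (ih.cons y).trans (by simp)

lemma pvHeapPush_mem {q : List (Int × Int × Int)} {x z : Int × Int × Int}
    (h : z ∈ pvHeapPush q x) : z ∈ q ∨ z = x := by
  have := (pvHeapPush_perm q x).mem_iff.mp h
  simp at this; tauto

lemma pvHeapPush_pairwise {q : List (Int × Int × Int)} {x : Int × Int × Int}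
    (hp : q.Pairwise (fun a b => pvLex3Lt a b = true))
    (hne : ∀ e ∈ q, e ≠ x) :
    (pvHeapPush q x).Pairwise (fun a b => pvLex3Lt a b = true) := by
  induction q with
  | nil => simp [pvHeapPush]
  | cons y t ih =>
    rw [List.pairwise_cons] at hp
    simp only [pvHeapPush]
    split
    · rename_i hxy
      refine List.Pairwise.cons ?_ (List.Pairwise.cons hp.1 hp.2)
      intro z hz
      rcases List.mem_cons.mp hz with rfl | hz
      · exact hxy
      · exact pvLex3_trans hxy (hp.1 z hz)
    · rename_i hxy
      have hyx : pvLex3Lt y x = true := by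
        rcases pvLex3_total x y with h | h | h
        · exact absurd h hxy
        · exact absurd h.symm (hne y (by simp))
        · exact h
      refine List.Pairwise.cons ?_ (ih hp.2 (fun e he => hne e (by simp [he])))
      intro z hz
      rcases pvHeapPush_mem hz with hz | rfl
      · exact hp.1 z hz
      · exact hyx

lemma pvMinScan_cons (x y : Int × Int × Int) (s : List (Int × Int × Int)) :
    pvMinScan x (y :: s) = pvMinScan (if pvLex3Lt y x then y else x) s := by
  simp [pvMinScan]

lemma pvMinScan_mem (x : Int × Int × Int) (t : List (Int × Int × Int)) :
    pvMinScan x t ∈ x :: t := by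
  induction t generalizing x with
  | nil => simp [pvMinScan]
  | cons y s ih =>
    rw [pvMinScan_cons]
    by_cases hxy : pvLex3Lt y x = true
    · rw [if_pos hxy]
      rcases List.mem_cons.mp (ih y) with h | h
      · simp [h]
      · simp [h]
    · rw [if_neg hxy]
      rcases List.mem_cons.mp (ih x) with h | h
      · simp [h]
      · simp [h]

lemma pvMinScan_notLt (x : Int × Int × Int) (t : List (Int × Int × Int)) :
    ∀ y ∈ x :: t, pvLex3Lt y (pvMinScan x t) = false := by
  induction t generalizing x with
  | nil =>
    intro y hy; simp at hy; subst hy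
    simpa [pvMinScan] using pvLex3_irrefl y
  | cons z s ih =>
    intro y hy
    rw [pvMinScan_cons]
    by_cases hzx : pvLex3Lt z x = true
    · rw [if_pos hzx]
      by_cases hyx : y = x
      · subst hyx
        -- y is the discarded larger element: z < y and the scan result is ≤ z
        have hz := ih z z (by simp)
        cases hb : pvLex3Lt y (pvMinScan z s)
        · rfl
        · exfalso; have := pvLex3_trans hzx hb; rw [this] at hz; simp at hz
      · have hy2 : y ∈ z :: s := by
          rcases List.mem_cons.mp hy with h | h
          · exact absurd h hyx
          · exact h
        exact ih z y hy2
    · rw [if_neg hzx]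
      by_cases hyz : y = z
      · subst hyz
        -- y is the discarded element with ¬ y < x
        cases hb : pvLex3Lt y (pvMinScan x s)
        · rfl
        · exfalso
          have hx := ih x x (by simp)
          rcases pvLex3_total y x with h | h | h
          · exact hzx h
          · rw [h] at hb; rw [hb] at hx; simp at hx
          · have := pvLex3_trans h hb; rw [this] at hx; simp at hx
      · have hy2 : y ∈ x :: s := by
          rcases List.mem_cons.mp hy with h | h
          · simp [h]
          · rcases List.mem_cons.mp h with h2 | h2
            · exact absurd h2 hyz
            · simp [h2]
        exact ih x y hy2

-- with a strictly sorted queue permuting avail = x :: t, the linear min scan finds queue's head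
lemma pvMinScan_eq_head {m : Int × Int × Int} {rest : List (Int × Int × Int)}
    {x : Int × Int × Int} {t : List (Int × Int × Int)}
    (hperm : (m :: rest).Perm (x :: t))
    (hp : (m :: rest).Pairwise (fun a b => pvLex3Lt a b = true)) :
    pvMinScan x t = m := by
  have hmem : pvMinScan x t ∈ m :: rest := hperm.symm.subset (pvMinScan_mem x t)
  rcases List.mem_cons.mp hmem with h | h
  · exact h
  · exfalso
    have hlt : pvLex3Lt m (pvMinScan x t) = true :=
      (List.pairwise_cons.mp hp).1 _ h
    have hm : m ∈ x :: t := hperm.subset (by simp)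
    have := pvMinScan_notLt x t m hm
    rw [hlt] at this; exact absurd this (by simp)

-- the lockstep simulation: A's state (queue) and B's state (avail, total, done) correspond
lemma pvLockstep (sj : List (List Int)) (N : Nat) :
    ∀ (time : Int) (li : Nat) (queue : List (Int × Int × Int)) (answer : List Int)
      (avail : List (Int × Int × Int)),
      queue.Perm avail →
      queue.Pairwise (fun a b => pvLex3Lt a b = true) →
      (∀ e ∈ queue, e.2.2 < (li : Int)) →
      pvLoopA sj N time li queue answer = pvLoopB sj N time li avail answer.sum answer.length := by
  intro time li queue answer
  fun_induction pvLoopA sj N time li queue answer with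
  | case1 time li queue answer hfull =>
    intro avail _ _ _
    rw [pvLoopB]; simp [hfull]
  | case2 time li queue answer hfull hpush ih =>
    intro avail hperm hp hb
    rw [pvLoopB]
    have hjump : ¬ (avail = [] ∧ li < N ∧ time < (sj.getD li []).getD 0 0) := by
      intro ⟨_, _, hlt⟩; omega
    simp only [dif_neg hfull, dif_neg hjump, dif_pos hpush]
    apply ih
    · exact (pvHeapPush_perm _ _).trans (hperm.append_right _)
    · exact pvHeapPush_pairwise hp (fun e he => by
        have := hb e he
        intro hx; rw [hx] at this; simp at this)
    · intro e he
      rcases pvHeapPush_mem he with he | rfl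
      · have := hb e he; push_cast; omega
      · push_cast; omega
  | case3 time li answer hfull hpush hli ih =>
    -- idle step: A does time + 1; B jumps to the arrival
    intro avail hperm hp hb
    have havail : avail = [] := hperm.symm.eq_nil
    subst havail
    have harr : time < (sj.getD li []).getD 0 0 := by
      rcases not_and_or.mp hpush with h | h
      · exact absurd hli h
      · omega
    rw [ih [] (List.Perm.refl _) List.Pairwise.nil (by simp)]
    conv_rhs => rw [pvLoopB]
    rw [dif_neg hfull,
      dif_pos (⟨rfl, hli, harr⟩ : ([] : List (Int × Int × Int)) = [] ∧ li < N ∧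
        time < (sj.getD li []).getD 0 0)]
    rcases eq_or_lt_of_le (by omega : time + 1 ≤ (sj.getD li []).getD 0 0) with h1 | h1
    · rw [h1]
    · conv_lhs => rw [pvLoopB]
      rw [dif_neg hfull,
        dif_pos (⟨rfl, hli, h1⟩ : ([] : List (Int × Int × Int)) = [] ∧ li < N ∧
          time + 1 < (sj.getD li []).getD 0 0)]
  | case4 time li answer hfull hpush hli =>
    -- dead state: queue empty, all jobs pushed, answer not full; both ports return the guard 0
    intro avail hperm _ _
    have havail : avail = [] := hperm.symm.eq_nil
    subst havail
    rw [pvLoopB]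
    have hjump : ¬ (([] : List (Int × Int × Int)) = [] ∧ li < N ∧
        time < (sj.getD li []).getD 0 0) := by
      intro ⟨_, h, _⟩; exact hli h
    rw [dif_neg hfull, dif_neg hjump, dif_neg hpush]
  | case5 time li answer hfull hpush d c idx rest ih =>
    intro avail hperm hp hb
    rw [pvLoopB]
    have hne : avail ≠ [] := by
      intro h; rw [h] at hperm; exact absurd hperm.eq_nil (by simp)
    obtain ⟨x, t, rfl⟩ := List.exists_cons_of_ne_nil hne
    have hjump : ¬ (x :: t = [] ∧ li < N ∧ time < (sj.getD li []).getD 0 0) := by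
      intro ⟨h, _⟩; exact absurd h (by simp)
    have hmin : pvMinScan x t = (d, c, idx) := pvMinScan_eq_head hperm hp
    rw [dif_neg hfull, dif_neg hjump, dif_neg hpush]
    simp only [hmin]
    have hmem : (d, c, idx) ∈ x :: t := hperm.subset (by simp)
    rw [PySem.List.remove?_eq_some_erase (x :: t) (d, c, idx) hmem]
    have hperm' : rest.Perm ((x :: t).erase (d, c, idx)) := by
      have := hperm.erase (d, c, idx)
      rw [List.erase_cons_head] at this
      exact this
    have := ih ((x :: t).erase (d, c, idx)) hperm' hp.of_cons
      (fun e he => hb e (by simp [he]))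
    simpa using this

-- ===== VERDICT (by name: the statement is the Claim_ definition above) =====
theorem solution_spec : Claim_equal_solution := by
  intro jobs _ _
  unfold Spec_solution solution solution_alt
  exact pvLockstep _ _ 0 0 [] [] [] (List.Perm.refl _) List.Pairwise.nil (by simp)
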